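-- pv_equiv track=rewrite | github.com/collinsakenga/codewars_solutions | 5 kyu/Simple Fun 188 Slogans.py | slogans
-- ===== SOURCE A (Python) =====
-- def slogans(p,r):
--     combo=set()
--     for i in range(len(p)):
--         for j in range(i, len(p)):
--             combo.add(p[i:j+1])
--     total=0
--     index=0
--     while True:
--         flag=True
--         for i in range(index, len(r)):
--             if r[index:i+1] not in combo:
--                 index=i
--                 flag=False
--                 break
--         total+=1
--         if flag:
--             break
--     return total
-- ===== SOURCE B (Python) =====
-- def slogans(p, r):
--     # Greedy longest-match scan: each round emits one piece, finding the longest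
--     # prefix of the remaining text that is a substring of p by BINARY SEARCH on the
--     # piece length (valid lengths are prefix-closed), testing containment directly
--     # with `in` instead of precomputing the set of all substrings of p.
--     total = 0
--     i = 0
--     n = len(r)
--     while True:
--         total += 1
--         lo, hi = 0, min(len(p), n - i)
--         while lo < hi:
--             mid = (lo + hi + 1) // 2
--             if r[i:i + mid] in p:
--                 lo = mid
--             else:
--                 hi = mid - 1
--         i += lo
--         if i >= n:
--             return total
--         if lo == 0:
--             return -1  # r[i] never occurs in p: r cannot be formed (A never returns here)
-- ===== Notes on version B (the rewrite author's own statement) =====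
-- stated objective: faster
-- what changed: B drops A's precomputed set of all O(len(p)^2) substrings and instead scans r greedily, one piece per round, finding each longest matchable piece by binary search on the piece length (valid lengths are prefix-closed) with a direct substring-containment test against p.
import Mathlib
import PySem

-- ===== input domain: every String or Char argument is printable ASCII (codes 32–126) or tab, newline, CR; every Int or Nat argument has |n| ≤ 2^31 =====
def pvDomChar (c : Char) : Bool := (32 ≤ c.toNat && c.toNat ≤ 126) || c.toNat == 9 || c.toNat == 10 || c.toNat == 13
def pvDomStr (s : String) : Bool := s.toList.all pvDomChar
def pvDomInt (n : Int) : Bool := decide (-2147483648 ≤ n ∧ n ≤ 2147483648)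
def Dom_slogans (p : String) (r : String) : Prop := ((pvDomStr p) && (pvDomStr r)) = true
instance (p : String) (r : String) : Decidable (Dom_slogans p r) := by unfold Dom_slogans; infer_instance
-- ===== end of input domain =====

-- B replaces A's precomputed set of all substrings of p by a greedy scan whose longest
-- match is found by binary search on the piece length using direct substring containment
-- (objective: faster).


-- ===== PORT A =====
-- combo = { p[i:j+1] : 0 ≤ i ≤ j < len(p) }
def slogansCombo (P : List Char) : PySem.Set (List Char) :=
  (PySem.List.pyRange 0 P.length 1).foldl (fun c i =>
    (PySem.List.pyRange i P.length 1).foldl (fun c j =>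
      PySem.Set.add c (PySem.List.slice P (some i) (some (j + 1)))) c)
    PySem.Set.empty

-- the 'while True' loop of A; fuel only makes it total (Pre_ guarantees it is never exhausted)
def slogansLoop (combo : PySem.Set (List Char)) (R : List Char)
    (fuel : Nat) (total : Int) (index : Int) : Int :=
  match fuel with
  | 0 => total
  | fuel + 1 =>
    match (PySem.List.pyRange index R.length 1).find?
        (fun i => !(PySem.Set.contains combo (PySem.List.slice R (some index) (some (i + 1))))) with
    | none => total + 1                                   -- flag stayed True: break
    | some i => slogansLoop combo R fuel (total + 1) i    -- flag False: index = i, continue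

def slogans (p : String) (r : String) : Int :=
  let P := p.toList
  let R := r.toList
  slogansLoop (slogansCombo P) R (R.length + 1) 0 0

-- ===== PORT B =====
-- binary search: largest L in [lo, hi] such that r[i:i+L] in p (valid L are prefix-closed)
def slogansAltSearch (P R : List Char) (i : Int) (fuel : Nat) (lo hi : Int) : Int :=
  match fuel with
  | 0 => lo
  | fuel + 1 =>
    if lo < hi then
      let mid := PySem.Int.floordiv (lo + hi + 1) 2
      if PySem.Chars.isIn (PySem.List.slice R (some i) (some (i + mid))) P then
        slogansAltSearch P R i fuel mid hi
      else
        slogansAltSearch P R i fuel lo (mid - 1)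
    else lo

-- the 'while True' greedy loop of B: each round emits one piece
def slogansAltLoop (P R : List Char) (fuel : Nat) (total : Int) (i : Int) : Int :=
  match fuel with
  | 0 => total
  | fuel + 1 =>
    let total := total + 1
    let lo := slogansAltSearch P R i (P.length + 1) 0
                (min (P.length : Int) ((R.length : Int) - i))
    if i + lo ≥ (R.length : Int) then total
    else if lo = 0 then -1
    else slogansAltLoop P R fuel total (i + lo)

def slogans_alt (p : String) (r : String) : Int :=
  slogansAltLoop p.toList r.toList (r.toList.length + 1) 0 0

-- ===== PRECONDITION & SPEC =====
-- Pre_ excludes inputs where some character of r is not a character of p: there A's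
-- while-loop never advances 'index' and the Python diverges (no value is returned).
def Pre_slogans (p : String) (r : String) : Prop :=
  (r.toList.all (fun c => p.toList.contains c)) = true
instance (p : String) (r : String) : Decidable (Pre_slogans p r) := by
  unfold Pre_slogans; infer_instance

def pvWitness_slogans : String × String := ("ab", "abba")

def Spec_slogans (p : String) (r : String) (out : Int) : Prop := out = slogans_alt p r
instance (p : String) (r : String) (out : Int) : Decidable (Spec_slogans p r out) := by
  unfold Spec_slogans; infer_instance

-- ===== CLAIM (what is proved, stated in full; the proofs are below) =====
def Claim_equal_slogans : Prop := ∀ (p : String) (r : String), Dom_slogans p r → Pre_slogans p r → Spec_slogans p r (slogans p r)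

-- ===== LEMMAS AND PROOFS =====

-- the greedy length at a position: the largest L ≤ |rest| with rest.take L a substring of p
def gLen (P rest : List Char) : Nat :=
  Nat.findGreatest (fun L => rest.take L <:+: P) rest.length

lemma gLen_le (P rest : List Char) : gLen P rest ≤ rest.length :=
  Nat.findGreatest_le _

lemma gLen_spec (P rest : List Char) : rest.take (gLen P rest) <:+: P :=
  Nat.findGreatest_spec (P := fun L => rest.take L <:+: P) (Nat.zero_le _)
    (by simp only [List.take_zero]; exact List.nil_infix)
lemma gLen_mono (P rest : List Char) {L : Nat} (hL : L ≤ gLen P rest) :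
    rest.take L <:+: P := by
  have h := gLen_spec P rest
  have : rest.take L = (rest.take (gLen P rest)).take L := by
    rw [List.take_take, Nat.min_eq_left hL]
  rw [this]
  exact ((rest.take (gLen P rest)).take_prefix L).isInfix.trans h

lemma gLen_greatest (P rest : List Char) {L : Nat} (h1 : gLen P rest < L)
    (h2 : L ≤ rest.length) : ¬ rest.take L <:+: P := by
  exact Nat.findGreatest_is_greatest h1 h2

lemma gLen_iff (P rest : List Char) {L : Nat} (h2 : L ≤ rest.length) :
    rest.take L <:+: P ↔ L ≤ gLen P rest := by
  constructor
  · intro h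
    by_contra hc
    exact gLen_greatest P rest (Nat.lt_of_not_le hc) h2 h
  · exact gLen_mono P rest

lemma gLen_le_lenP (P rest : List Char) : gLen P rest ≤ P.length := by
  have h := (gLen_spec P rest).length_le
  rwa [List.length_take, Nat.min_eq_left (gLen_le P rest)] at h

lemma gLen_pos (P rest : List Char) (hne : rest ≠ [])
    (hmem : ∀ c ∈ rest, c ∈ P) : 1 ≤ gLen P rest := by
  apply Nat.le_findGreatest
  · exact Nat.one_le_iff_ne_zero.mpr (by simpa using hne)
  · cases rest with
    | nil => exact absurd rfl hne
    | cons a t =>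
      simp only [List.take_succ_cons, List.take_zero]
      obtain ⟨s, u, hsu⟩ := List.append_of_mem (hmem a (List.mem_cons_self))
      exact ⟨s, u, by simp [hsu]⟩

-- membership in a fold of Set.add-shaped updates
lemma mem_foldl_set {α : Type} [BEq α] [LawfulBEq α] (x : α) (Q : Int → Prop)
    (F : PySem.Set α → Int → PySem.Set α)
    (hF : ∀ c i, x ∈ F c i ↔ x ∈ c ∨ Q i) :
    ∀ (l : List Int) (acc : PySem.Set α),
      x ∈ l.foldl F acc ↔ x ∈ acc ∨ ∃ i ∈ l, Q i := by
  intro l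
  induction l with
  | nil => simp
  | cons a t ih =>
    intro acc
    simp only [List.foldl_cons, ih, hF, List.mem_cons]
    constructor
    · rintro (⟨h | h⟩ | ⟨i, hi, hq⟩)
      · exact Or.inl h
      · exact Or.inr ⟨a, Or.inl rfl, h⟩
      · exact Or.inr ⟨i, Or.inr hi, hq⟩
    · rintro (h | ⟨i, rfl | hi, hq⟩)
      · exact Or.inl (Or.inl h)
      · exact Or.inl (Or.inr hq)
      · exact Or.inr ⟨i, hi, hq⟩

lemma mem_combo_iff (P : List Char) (x : List Char) :
    x ∈ slogansCombo P ↔ (x <:+: P ∧ x ≠ []) := by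
  unfold slogansCombo
  rw [mem_foldl_set x
    (Q := fun i => ∃ j ∈ PySem.List.pyRange i (P.length : Int) 1,
      x = PySem.List.slice P (some i) (some (j + 1)))
    (F := _)
    (by
      intro c i
      rw [mem_foldl_set x
        (Q := fun j => x = PySem.List.slice P (some i) (some (j + 1)))
        (F := _)
        (by intro c j; simp [PySem.Set.mem_add])]
      )]
  simp only [PySem.Set.empty, List.not_mem_nil, false_or, PySem.List.mem_pyRange_one]
  constructor
  · rintro ⟨i, ⟨hi0, hiP⟩, j, ⟨hij, hjP⟩, rfl⟩
    have h1 : (0:Int) ≤ j + 1 := by omega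
    rw [PySem.List.slice_toNat P hi0 h1]
    constructor
    · exact ((P.drop i.toNat).take_prefix _).isInfix.trans (P.drop_suffix i.toNat).isInfix
    · have hlen : ((P.drop i.toNat).take ((j+1).toNat - i.toNat)).length
          = min ((j+1).toNat - i.toNat) (P.length - i.toNat) := by
        simp [List.length_take, List.length_drop]
      intro hnil
      rw [hnil] at hlen
      simp only [List.length_nil] at hlen
      omega
  · rintro ⟨⟨t, s, rfl⟩, hne⟩
    have hxpos := x.length_pos_of_ne_nil hne
    refine ⟨(t.length : Int), ⟨by omega, by simp only [List.length_append]; push_cast; omega⟩,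
      (t.length : Int) + (x.length : Int) - 1, ⟨by omega,
        by simp only [List.length_append]; push_cast; omega⟩, ?_⟩
    have hx : (t.length : Int) + (x.length : Int) - 1 + 1 = ((t.length + x.length : Nat) : Int) := by
      push_cast; ring
    rw [hx, PySem.List.slice_natCast]
    simp
-- first failing scan index of A = index + gLen (or none when the whole rest matches)
lemma find?_pyRange_first (p : Int → Bool) (t : Int) :
    ∀ (n : Nat) (a b : Int), (b - a).toNat = n → a ≤ t →
    (∀ i, a ≤ i → i < b → (p i = true ↔ t ≤ i)) →
    (PySem.List.pyRange a b 1).find? p = if t < b then some t else none := by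
  intro n
  induction n with
  | zero =>
    intro a b hn hat h
    rw [PySem.List.pyRange_one_eq_nil (by omega), List.find?_nil, if_neg (by omega)]
  | succ m ih =>
    intro a b hn hat h
    rw [PySem.List.pyRange_one_cons (by omega)]
    by_cases hta : t = a
    · subst hta
      have hp : p t = true := (h t le_rfl (by omega)).mpr le_rfl
      simp [hp, if_pos (show t < b by omega)]
    · have hp : p a = false := by
        have h2 := h a le_rfl (by omega)
        cases hpa : p a with
        | false => rfl
        | true => exact absurd (le_antisymm (h2.mp hpa) hat) hta
      rw [List.find?_cons_of_neg (by simp [hp])]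
      exact ih (a + 1) b (by omega) (by omega) (fun i h1 h2 => h i (by omega) h2)

lemma scan_eq (P R : List Char) (index : Int) (h0 : 0 ≤ index) (hlt : index < (R.length : Int)) :
    (PySem.List.pyRange index (R.length : Int) 1).find?
        (fun i => !(PySem.Set.contains (slogansCombo P)
          (PySem.List.slice R (some index) (some (i + 1))))) =
      (if index + (gLen P (R.drop index.toNat) : Int) < (R.length : Int)
        then some (index + (gLen P (R.drop index.toNat)))
        else none) := by
  set rest := R.drop index.toNat with hrest
  have hrlen : (rest.length : Int) = (R.length : Int) - index := by
    simp [hrest, List.length_drop]; omega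
  apply find?_pyRange_first _ _ ((R.length : Int) - index).toNat index _ rfl (by
    have := gLen_le P rest; omega)
  intro i hai hib
  have h1 : (0:Int) ≤ i + 1 := by omega
  rw [PySem.List.slice_toNat R h0 h1]
  have hL : (i + 1).toNat - index.toNat = i.toNat + 1 - index.toNat := by omega
  have hLle : i.toNat + 1 - index.toNat ≤ rest.length := by
    simp [hrest, List.length_drop]; omega
  rw [hL]
  have hiff := gLen_iff P rest hLle
  rw [← hrest]
  simp only [Bool.not_eq_true']
  constructor
  · intro hcon
    by_contra hc
    have h3 : i.toNat + 1 - index.toNat ≤ gLen P rest := by omega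
    have hinf := gLen_mono P rest h3
    have hnonempty : rest.take (i.toNat + 1 - index.toNat) ≠ [] := by
      intro hnil
      have := congrArg List.length hnil
      simp only [List.length_take, List.length_nil] at this
      omega
    have hmem : rest.take (i.toNat + 1 - index.toNat) ∈ slogansCombo P :=
      (mem_combo_iff P _).mpr ⟨hinf, hnonempty⟩
    rw [← PySem.Set.contains_iff] at hmem
    rw [hmem] at hcon
    simp at hcon
  · intro hti
    rw [Bool.eq_false_iff]
    intro hcon
    rw [PySem.Set.contains_iff, mem_combo_iff] at hcon
    have := hiff.mp hcon.1
    omega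

-- B's binary search returns gLen
lemma altSearch_eq (P R : List Char) (i : Int) (h0 : 0 ≤ i) (hi : i ≤ (R.length : Int)) :
    ∀ (fuel : Nat) (lo hi' : Int), 0 ≤ lo → lo ≤ hi' →
    hi' ≤ min (P.length : Int) ((R.length : Int) - i) →
    (hi' - lo).toNat < fuel →
    lo ≤ (gLen P (R.drop i.toNat) : Int) → (gLen P (R.drop i.toNat) : Int) ≤ hi' →
    slogansAltSearch P R i fuel lo hi' = (gLen P (R.drop i.toNat) : Int) := by
  set rest := R.drop i.toNat with hrest
  have hrlen : (rest.length : Int) = (R.length : Int) - i := by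
    simp [hrest, List.length_drop]; omega
  intro fuel
  induction fuel with
  | zero => intro lo hi' _ _ _ hf; omega
  | succ f ih =>
    intro lo hi' hlo0 hlh hbound hf hlog hghi
    unfold slogansAltSearch
    by_cases hlt : lo < hi'
    · rw [if_pos hlt]
      have hmid := PySem.Int.floordiv_two_mid_bounds (lo := lo + 1) (hi := hi') (by omega)
      have hmid' : lo + 1 + hi' = lo + hi' + 1 := by ring
      rw [hmid'] at hmid
      set mid := PySem.Int.floordiv (lo + hi' + 1) 2 with hmiddef
      have hmid1 : lo + 1 ≤ mid := hmid.1
      have hmid2 : mid ≤ hi' := hmid.2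
      have hmtoNat : mid.toNat ≤ rest.length := by omega
      have hslice : PySem.List.slice R (some i) (some (i + mid)) = rest.take mid.toNat := by
        rw [PySem.List.slice_toNat R h0 (by omega)]
        congr 1
        omega
      have hiff := gLen_iff P rest hmtoNat
      show (if PySem.Chars.isIn (PySem.List.slice R (some i) (some (i + mid))) P = true
          then slogansAltSearch P R i f mid hi'
          else slogansAltSearch P R i f lo (mid - 1)) = (gLen P (R.drop i.toNat) : Int)
      by_cases hin : rest.take mid.toNat <:+: P
      · rw [hslice, if_pos ((PySem.Chars.isIn_iff_infix _ _).mpr hin)]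
        have hge : mid ≤ (gLen P rest : Int) := by
          have := hiff.mp hin; omega
        exact ih mid hi' (by omega) (by omega) hbound (by omega) hge hghi
      · rw [hslice, if_neg (by
          intro hc
          exact hin ((PySem.Chars.isIn_iff_infix _ _).mp hc))]
        have hlt' : (gLen P rest : Int) < mid := by
          by_contra hc
          exact hin (hiff.mpr (by omega))
        exact ih lo (mid - 1) hlo0 (by omega) (by omega) (by omega) hlog (by omega)
    · rw [if_neg hlt]
      omega

-- the two loops agree from any common state inside r
-- the two loops agree from any common state 0 ≤ index ≤ |R|
lemma loops_eq (P R : List Char) (hmem : ∀ c ∈ R, c ∈ P) :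
    ∀ (fa : Nat) (fb : Nat) (total index : Int), 0 ≤ index → index ≤ (R.length : Int) →
    (R.length : Int) - index < (fa : Int) → (R.length : Int) - index < (fb : Int) →
    slogansLoop (slogansCombo P) R fa total index = slogansAltLoop P R fb total index := by
  intro fa
  induction fa with
  | zero => intro fb total index h0 hle hfa hfb; omega
  | succ f ih =>
    intro fb total index h0 hle hfa hfb
    have hrlen : ((R.drop index.toNat).length : Int) = (R.length : Int) - index := by
      simp [List.length_drop]; omega
    have hgle : gLen P (R.drop index.toNat) ≤ (R.drop index.toNat).length := gLen_le P _
    have hgleP : gLen P (R.drop index.toNat) ≤ P.length := gLen_le_lenP P _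
    obtain ⟨fb', rfl⟩ : ∃ fb', fb = fb' + 1 := ⟨fb - 1, by omega⟩
    unfold slogansLoop slogansAltLoop
    rw [altSearch_eq P R index h0 hle (P.length + 1) 0
        (min (P.length : Int) ((R.length : Int) - index)) le_rfl (by omega) le_rfl
        (by omega) (by omega) (by omega)]
    by_cases hend : index = (R.length : Int)
    · -- the remainder is empty: A's scan range is empty, B's piece closes the string
      have hg0 : gLen P (R.drop index.toNat) = 0 := by omega
      rw [PySem.List.pyRange_one_eq_nil (by omega), List.find?_nil]
      show total + 1 = if index + (gLen P (R.drop index.toNat) : Int) ≥ (R.length : Int)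
          then total + 1
          else if (gLen P (R.drop index.toNat) : Int) = 0 then -1
          else slogansAltLoop P R fb' (total + 1) (index + (gLen P (R.drop index.toNat) : Int))
      rw [if_pos (by omega)]
    · have hlt : index < (R.length : Int) := by omega
      have hrne : R.drop index.toNat ≠ [] := by
        intro hnil; rw [hnil] at hrlen; simp at hrlen; omega
      have hmem' : ∀ c ∈ R.drop index.toNat, c ∈ P := fun c hc => hmem c (List.mem_of_mem_drop hc)
      have hg1 : 1 ≤ gLen P (R.drop index.toNat) := gLen_pos P _ hrne hmem'
      rw [scan_eq P R index h0 hlt]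
      show (match (if index + (gLen P (R.drop index.toNat) : Int) < (R.length : Int)
            then some (index + (gLen P (R.drop index.toNat) : Int)) else none) with
          | none => total + 1
          | some i => slogansLoop (slogansCombo P) R f (total + 1) i) =
        (if index + (gLen P (R.drop index.toNat) : Int) ≥ (R.length : Int)
          then total + 1
          else if (gLen P (R.drop index.toNat) : Int) = 0 then -1
          else slogansAltLoop P R fb' (total + 1) (index + (gLen P (R.drop index.toNat) : Int)))
      by_cases hdone : index + (gLen P (R.drop index.toNat) : Int) < (R.length : Int)
      · rw [if_pos hdone, if_neg (by omega),
          if_neg (show ¬ (gLen P (R.drop index.toNat) : Int) = 0 by omega)]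
        exact ih fb' (total + 1) (index + (gLen P (R.drop index.toNat) : Int)) (by omega)
          (by omega) (by omega) (by omega)
      · rw [if_neg hdone, if_pos (by omega)]

-- ===== VERDICT (by name: the statement is the Claim_ definition above) =====
theorem slogans_spec : Claim_equal_slogans := by
  intro p r _ hpre
  have hmemall : ∀ c ∈ r.toList, c ∈ p.toList := by
    unfold Pre_slogans at hpre
    simpa using hpre
  show slogans p r = slogans_alt p r
  unfold slogans slogans_alt
  exact loops_eq p.toList r.toList hmemall (r.toList.length + 1) (r.toList.length + 1) 0 0
    le_rfl (by omega) (by omega) (by omega)
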